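-- pv_equiv track=rewrite | github.com/ArniDagur/guide-key.nvim | rplugin/python3/guidekey/menu.py | create_lines_of_buffer
-- ===== SOURCE A (Python) =====
-- def create_lines_of_buffer(nvim, layout, data_dict): #{{{
--     # Create the contents of the buffer to be shown on screen
--     lines_of_buffer = ['']
--     col = 0
--     for key in data_dict.keys():
--         addition = "[{}] {}".format(key, data_dict[key]['desc'])
--         # Fill rest of column with whitespace
--         addition += ' ' * (layout['col_width'] - len(addition))
--         if col < layout['n_cols']:
--             lines_of_buffer[-1] += addition
--             col += 1
--         else:
--             lines_of_buffer.append(addition)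
--             col = 1
--     return lines_of_buffer
-- ===== SOURCE B (Python) =====
-- def create_lines_of_buffer(nvim, layout, data_dict):
--     # Build all padded cells first, then cut the flat list into rows of n_cols.
--     entries = ["[{}] {}".format(k, v['desc']).ljust(layout['col_width'])
--                for k, v in data_dict.items()]
--     if not entries:
--         # a buffer always has at least one line
--         return ['']
--     n = layout['n_cols']
--     lines = []
--     while entries:
--         lines.append(''.join(entries[:n]))
--         entries = entries[n:]
--     return lines
-- ===== Notes on version B (the rewrite author's own statement) =====
-- stated objective: alternative
-- what changed: Replaced the stateful column-counter fold (mutating the last buffer line in place) by a two-phase build-then-reshape: map every dict entry to its padded cell string, then slice that flat list into rows of n_cols and join each row; Pre_ excludes layouts with n_cols <= 0 on a nonempty data_dict (a nonsensical column count on which A's leading blank line is an artefact of its loop state and B's chunking loop does not terminate), and inputs where A raises KeyError on missing 'col_width'/'n_cols'/'desc' keys, and association lists with duplicate data_dict keys which no Python dict can represent.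
import Mathlib
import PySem

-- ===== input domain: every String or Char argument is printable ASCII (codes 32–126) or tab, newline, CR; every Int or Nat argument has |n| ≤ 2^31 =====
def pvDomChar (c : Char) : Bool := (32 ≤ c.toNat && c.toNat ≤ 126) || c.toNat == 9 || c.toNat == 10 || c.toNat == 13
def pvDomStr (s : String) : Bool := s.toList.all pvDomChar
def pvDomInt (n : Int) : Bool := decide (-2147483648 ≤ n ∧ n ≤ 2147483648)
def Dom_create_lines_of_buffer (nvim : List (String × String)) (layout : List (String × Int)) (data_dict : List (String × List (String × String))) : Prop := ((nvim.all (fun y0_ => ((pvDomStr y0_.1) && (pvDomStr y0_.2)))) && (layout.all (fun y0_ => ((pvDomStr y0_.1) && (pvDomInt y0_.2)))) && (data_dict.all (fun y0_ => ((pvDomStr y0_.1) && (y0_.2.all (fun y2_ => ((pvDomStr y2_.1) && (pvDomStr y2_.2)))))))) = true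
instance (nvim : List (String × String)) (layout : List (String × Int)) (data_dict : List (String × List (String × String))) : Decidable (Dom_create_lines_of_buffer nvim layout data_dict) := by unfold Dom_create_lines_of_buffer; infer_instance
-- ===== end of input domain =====

-- B replaces A's stateful column-counter fold by a build-then-reshape two-phase computation
-- (pad all entries first, then cut the flat list into rows of n_cols); return value only, no mutation.

-- ===== PORT A =====
-- transliteration of A: fold over data_dict.keys() carrying (lines_of_buffer, col);
-- ' ' * k with possibly negative k is replicate (·).toNat (exact: Python yields '' for k ≤ 0)
def create_lines_of_buffer (nvim : List (String × String)) (layout : List (String × Int)) (data_dict : List (String × List (String × String))) : List String :=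
  let layoutD := PySem.Dict.mk layout
  let dataD := PySem.Dict.mk data_dict
  ((dataD.keys).foldl
    (fun (st : List String × Int) (key : String) =>
      let addition := "[" ++ key ++ "] " ++ (PySem.Dict.mk (dataD.getD key [])).getD "desc" ""
      let addition := addition ++ String.mk (List.replicate ((layoutD.getD "col_width" 0) - (PySem.Str.len addition)).toNat ' ')
      if st.2 < layoutD.getD "n_cols" 0 then
        (PySem.List.pySetD st.1 (-1) (PySem.List.pyGetD st.1 (-1) "" ++ addition), st.2 + 1)
      else (st.1 ++ [addition], 1))
    ([""], 0)).1

-- ===== PORT B =====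
-- str.ljust(w): pad with spaces to width w (exact, Python pads nothing for w ≤ len)
def pyLjust (s : String) (w : Int) : String :=
  s ++ String.mk (List.replicate (w - PySem.Str.len s).toNat ' ')

-- the 'while entries:' loop of Source B; fuel = |entries| bounds the iterations (reached for n ≥ 1,
-- the only case Pre_ admits); entries[:n] / entries[n:] with n ≥ 1 are take/drop n.toNat
def chunkJoinLoop (n : Nat) : Nat → List String → List String → List String
  | _, lines, [] => lines
  | 0, lines, _ => lines
  | fuel+1, lines, es => chunkJoinLoop n fuel (lines ++ [PySem.Str.join "" (es.take n)]) (es.drop n)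

def create_lines_of_buffer_alt (nvim : List (String × String)) (layout : List (String × Int)) (data_dict : List (String × List (String × String))) : List String :=
  let layoutD := PySem.Dict.mk layout
  let entries := data_dict.map (fun p =>
    pyLjust ("[" ++ p.1 ++ "] " ++ (PySem.Dict.mk p.2).getD "desc" "") (layoutD.getD "col_width" 0))
  if entries.isEmpty then [""]
  else chunkJoinLoop ((layoutD.getD "n_cols" 0)).toNat entries.length [] entries

-- ===== PRECONDITION & SPEC =====
-- Pre_ excludes (a) inputs on which A raises KeyError ('col_width' or 'n_cols' missing from
-- layout, or 'desc' missing from an entry's value dict), (b) layouts with n_cols ≤ 0 on a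
-- nonempty data_dict — a nonsensical column count, where A's leading blank line is an artefact
-- of its loop state and B's chunking loop does not terminate — and (c) association lists with
-- duplicate data_dict keys, which no Python dict can represent.
def Pre_create_lines_of_buffer (nvim : List (String × String)) (layout : List (String × Int)) (data_dict : List (String × List (String × String))) : Prop :=
  (data_dict.map Prod.fst).Nodup ∧
  (data_dict ≠ [] → "col_width" ∈ layout.map Prod.fst ∧ "n_cols" ∈ layout.map Prod.fst ∧
    0 < (PySem.Dict.mk layout).getD "n_cols" 0) ∧
  ∀ p ∈ data_dict, "desc" ∈ p.2.map Prod.fst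
instance (nvim : List (String × String)) (layout : List (String × Int)) (data_dict : List (String × List (String × String))) : Decidable (Pre_create_lines_of_buffer nvim layout data_dict) := by unfold Pre_create_lines_of_buffer; infer_instance

def pvWitness_create_lines_of_buffer : (List (String × String)) × (List (String × Int)) × (List (String × List (String × String))) :=
  ([("a", "b")], [("col_width", 8), ("n_cols", 2)],
   [("x", [("desc", "dx")]), ("y", [("desc", "dy")]), ("z", [("desc", "dz")])])

def Spec_create_lines_of_buffer (nvim : List (String × String)) (layout : List (String × Int)) (data_dict : List (String × List (String × String))) (out : List String) : Prop := out = create_lines_of_buffer_alt nvim layout data_dict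
instance (nvim : List (String × String)) (layout : List (String × Int)) (data_dict : List (String × List (String × String))) (out : List String) : Decidable (Spec_create_lines_of_buffer nvim layout data_dict out) := by unfold Spec_create_lines_of_buffer; infer_instance

-- ===== CLAIM (what is proved, stated in full; the proofs are below) =====
def Claim_equal_create_lines_of_buffer : Prop := ∀ (nvim : List (String × String)) (layout : List (String × Int)) (data_dict : List (String × List (String × String))), Dom_create_lines_of_buffer nvim layout data_dict → Pre_create_lines_of_buffer nvim layout data_dict → Spec_create_lines_of_buffer nvim layout data_dict (create_lines_of_buffer nvim layout data_dict)

-- ===== LEMMAS AND PROOFS =====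

-- A's loop, re-expressed relative to the last (open) line: while col < n the entry is merged
-- into the open line, otherwise a fresh line is opened.
def mergeChunks (n : Int) (last : String) (c : Int) : List String → List String
  | [] => [last]
  | e :: es => if c < n then mergeChunks n (last ++ e) (c + 1) es else last :: mergeChunks n e 1 es

theorem intercalate_nil_flatten (l : List (List Char)) : List.intercalate [] l = l.flatten := by
  simp only [List.intercalate]
  induction l with
  | nil => rfl
  | cons x xs ih => cases xs <;> simp_all [List.intersperse]

theorem join_empty_cons (x : String) (xs : List String) :
    PySem.Str.join "" (x :: xs) = x ++ PySem.Str.join "" xs := by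
  simp [PySem.Str.join, PySem.Chars.join, intercalate_nil_flatten]

theorem pySetD_append_neg_one (xs : List String) (x v : String) :
    PySem.List.pySetD (xs ++ [x]) (-1) v = xs ++ [v] := by
  simp [PySem.List.pySetD, PySem.List.pySet?, PySem.List.pyIdx?]

-- the accumulator of chunkJoinLoop is a pure prefix
theorem chunkJoinLoop_acc (n : Nat) (fuel : Nat) (lines es : List String) :
    chunkJoinLoop n fuel lines es = lines ++ chunkJoinLoop n fuel [] es := by
  induction fuel generalizing lines es with
  | zero => cases es <;> simp [chunkJoinLoop]
  | succ f ih =>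
    cases es with
    | nil => simp [chunkJoinLoop]
    | cons e es =>
      simp only [chunkJoinLoop]
      rw [ih (lines ++ _), ih ([] ++ _)]
      simp

-- A's loop body, after the dict lookups have been resolved to the padded entry
def stepA (n : Int) (st : List String × Int) (e : String) : List String × Int :=
  if st.2 < n then
    (PySem.List.pySetD st.1 (-1) (PySem.List.pyGetD st.1 (-1) "" ++ e), st.2 + 1)
  else (st.1 ++ [e], 1)

theorem foldl_stepA_merge (n : Int) (es : List String) (pre : List String) (last : String)
    (c : Int) (hc1 : 1 ≤ c) (hc2 : c ≤ n) :
    (es.foldl (stepA n) (pre ++ [last], c)).1 = pre ++ mergeChunks n last c es := by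
  induction es generalizing pre last c with
  | nil => simp [mergeChunks]
  | cons e es ih =>
    by_cases h : c < n
    · simp only [List.foldl_cons, stepA, h, if_true, mergeChunks,
        PySem.List.pyGetD_neg_one_append_singleton, pySetD_append_neg_one]
      exact ih pre (last ++ e) (c + 1) (by omega) (by omega)
    · simp only [List.foldl_cons, stepA, h, if_false, mergeChunks]
      rw [show (pre ++ [last]) ++ [e] = (pre ++ [last]) ++ [e] from rfl,
        ih (pre ++ [last]) e 1 (by omega) (by omega)]
      simp

theorem mergeChunks_eq_chunkJoinLoop (n : Int) (hn : 1 ≤ n) (es : List String) (fuel : Nat)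
    (hfuel : es.length ≤ fuel) (last : String) (c : Int) (hc1 : 1 ≤ c) (hc2 : c ≤ n) :
    mergeChunks n last c es =
      (last ++ PySem.Str.join "" (es.take (n - c).toNat)) ::
        chunkJoinLoop n.toNat fuel [] (es.drop (n - c).toNat) := by
  induction es generalizing fuel last c with
  | nil =>
    have hj : PySem.Str.join "" ([] : List String) = "" := by decide
    cases fuel <;> simp [mergeChunks, chunkJoinLoop, hj]
  | cons e es ih =>
    by_cases h : c < n
    · have ht : (n - c).toNat = (n - (c + 1)).toNat + 1 := by omega
      simp only [mergeChunks, h, if_true, ht, List.take_succ_cons, List.drop_succ_cons,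
        join_empty_cons]
      rw [ih fuel (by simpa using Nat.le_of_succ_le hfuel) (last ++ e) (c + 1) (by omega) (by omega)]
      simp [String.append_assoc]
    · have hcn : c = n := by omega
      have ht : (n - c).toNat = 0 := by omega
      simp only [mergeChunks, h, if_false, ht, List.take_zero, List.drop_zero]
      have hj : PySem.Str.join "" ([] : List String) = "" := by decide
      cases fuel with
      | zero => simp at hfuel
      | succ f =>
        simp only [chunkJoinLoop]
        rw [chunkJoinLoop_acc]
        have hm : n.toNat = ((n - 1).toNat) + 1 := by omega
        rw [hm]
        simp only [List.take_succ_cons, List.drop_succ_cons, join_empty_cons]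
        rw [ih f (by simpa [Nat.succ_le_succ_iff] using hfuel) e 1 (by omega) (by omega)]
        simp only [hj]
        have hnn : n.toNat - 1 + 1 = n.toNat := by omega
        simp [hnn]

-- ===== VERDICT (by name: the statement is the Claim_ definition above) =====
theorem create_lines_of_buffer_spec : Claim_equal_create_lines_of_buffer := by
  intro nvim layout data_dict _hdom hpre
  obtain ⟨hnodup, hlay, _⟩ := hpre
  unfold Spec_create_lines_of_buffer create_lines_of_buffer create_lines_of_buffer_alt
  simp only [PySem.Dict.keys_mk]
  set w : Int := (PySem.Dict.mk layout).getD "col_width" 0 with hw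
  set n : Int := (PySem.Dict.mk layout).getD "n_cols" 0 with hn
  set f : (String × List (String × String)) → String := fun p =>
    pyLjust ("[" ++ p.1 ++ "] " ++ (PySem.Dict.mk p.2).getD "desc" "") w with hf
  -- resolve A's dict lookups: fold over keys = fold over the padded entries
  have hA : (List.foldl
      (fun (st : List String × Int) (key : String) =>
        let addition := "[" ++ key ++ "] " ++
          (PySem.Dict.mk ((PySem.Dict.mk data_dict).getD key [])).getD "desc" ""
        let addition := addition ++
          String.mk (List.replicate ((w - PySem.Str.len addition)).toNat ' ')
        if st.2 < n then
          (PySem.List.pySetD st.1 (-1) (PySem.List.pyGetD st.1 (-1) "" ++ addition), st.2 + 1)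
        else (st.1 ++ [addition], 1))
      ([""], 0) (data_dict.map (fun x => x.1))) =
      (data_dict.map f).foldl (stepA n) ([""], 0) := by
    rw [List.foldl_map, List.foldl_map]
    apply PySem.List.foldl_congr_mem
    intro st p hp
    have hget : (PySem.Dict.mk data_dict).getD p.1 [] = p.2 := by
      apply PySem.Dict.getD_of_mem_items
      · simpa [PySem.Dict.items] using hp
      · simpa [PySem.Dict.keys_mk] using hnodup
    simp [hget, stepA, hf, pyLjust]
  rw [hA]
  set es : List String := data_dict.map f with hes
  by_cases hdd : data_dict = []
  · subst hdd; rw [hes]; simp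
  · have hpos : 0 < n := (hlay hdd).2.2
    have hne : es ≠ [] := by simp [hes, hdd]
    obtain ⟨e, es', hesc⟩ := List.exists_cons_of_ne_nil hne
    rw [hesc]
    simp only [List.isEmpty_cons, Bool.false_eq_true, if_false]
    have h0 : stepA n ([""], 0) e = ([] ++ [e], 1) := by
      simp [stepA, hpos, PySem.List.pySetD, PySem.List.pySet?, PySem.List.pyIdx?,
        PySem.List.pyGetD, PySem.List.pyGet?]
    rw [List.foldl_cons, h0, foldl_stepA_merge n es' [] e 1 (by omega) hpos]
    rw [mergeChunks_eq_chunkJoinLoop n hpos es' es'.length (le_refl _) e 1 (by omega) hpos]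
    simp only [List.length_cons, chunkJoinLoop]
    rw [chunkJoinLoop_acc]
    have hm : n.toNat = ((n - 1).toNat) + 1 := by omega
    rw [hm]
    simp only [List.take_succ_cons, List.drop_succ_cons, List.nil_append, join_empty_cons]
    conv_rhs => rw [chunkJoinLoop_acc]
    simp
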